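-- pv_equiv track=rewrite | github.com/devildudez/python_exercises | lesson_7_02_01_26/codewars_cat_dogs_years.py | human_years_cat_years_dog_years
-- ===== SOURCE A (Python) =====
-- def human_years_cat_years_dog_years(human_years):
--     if human_years < 1:
--         return None
--
--     a = []
--
--     while human_years >= 1 and type(human_years) == int:
--
--         if human_years == 1:
--             cat_years = 15
--             dog_years = 15
--
--         elif human_years == 2:
--             cat_years = 9 + 15
--             dog_years = 9 + 15
--         else:
--             cat_years = 24 + (human_years - 2) * 4
--             dog_years = 24 + (human_years - 2) * 5
--
--         a.append(human_years)
--         a.append(cat_years)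
--         a.append(dog_years)
--
--         break
--
--     return a
-- ===== SOURCE B (Python) =====
-- def human_years_cat_years_dog_years(human_years):
--     if human_years < 1:
--         return None
--     # age phases as half-open year intervals [start, end) with per-year growth rates
--     phases = [(1, 2, 15, 15), (2, 3, 9, 9), (3, human_years + 1, 4, 5)]
--     cat_years = 0
--     dog_years = 0
--     for start, end, c, d in phases:
--         span = max(min(end, human_years + 1) - start, 0)
--         cat_years += span * c
--         dog_years += span * d
--     return [human_years, cat_years, dog_years]
-- ===== Notes on version B (the rewrite author's own statement) =====
-- stated objective: alternative
-- what changed: Replaces A's if/elif selection of a closed-form formula (inside a dummy while/break loop) by an interval-overlap accumulation: the age table is a list of half-open year phases with per-year rates, and the result is the sum over phases of (overlap of the phase with [1, human_years]) times the rate, with no equality branching on human_years.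
import Mathlib
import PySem

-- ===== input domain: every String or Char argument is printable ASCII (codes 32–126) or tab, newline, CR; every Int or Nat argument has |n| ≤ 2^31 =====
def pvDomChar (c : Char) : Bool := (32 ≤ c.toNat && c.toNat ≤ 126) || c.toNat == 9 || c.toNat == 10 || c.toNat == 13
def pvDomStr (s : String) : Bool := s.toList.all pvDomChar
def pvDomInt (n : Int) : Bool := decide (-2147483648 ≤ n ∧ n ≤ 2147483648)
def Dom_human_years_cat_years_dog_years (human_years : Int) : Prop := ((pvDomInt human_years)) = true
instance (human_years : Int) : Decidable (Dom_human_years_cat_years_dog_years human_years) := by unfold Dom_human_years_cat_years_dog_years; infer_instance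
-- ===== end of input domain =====

-- B replaces A's if/elif selection of a closed-form formula (inside a dummy while/break loop)
-- by an interval-overlap accumulation over a table of half-open age phases with per-year rates;
-- alternative decomposition, not faster.

-- ===== PORT A =====
def human_years_cat_years_dog_years (human_years : Int) : Option (List Int) :=
  if human_years < 1 then none
  else
    let a : List Int := []
    -- while human_years >= 1 and type(human_years) == int: body runs once, then break
    -- (the argument is an int here, so type(human_years) == int is True)
    if human_years ≥ 1 then
      let cd : Int × Int :=
        if human_years = 1 then (15, 15)
        else if human_years = 2 then (9 + 15, 9 + 15)
        else (24 + (human_years - 2) * 4, 24 + (human_years - 2) * 5)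
      some (a ++ [human_years, cd.1, cd.2])
    else some a

-- ===== PORT B =====
def human_years_cat_years_dog_years_alt (human_years : Int) : Option (List Int) :=
  if human_years < 1 then none
  else
    let phases : List (Int × Int × Int × Int) :=
      [(1, 2, 15, 15), (2, 3, 9, 9), (3, human_years + 1, 4, 5)]
    let cd := phases.foldl
      (fun (cd : Int × Int) p =>
        let span := max (min p.2.1 (human_years + 1) - p.1) 0
        (cd.1 + span * p.2.2.1, cd.2 + span * p.2.2.2)) (0, 0)
    some [human_years, cd.1, cd.2]

-- ===== PRECONDITION & SPEC =====
def Spec_human_years_cat_years_dog_years (human_years : Int) (out : Option (List Int)) : Prop := out = human_years_cat_years_dog_years_alt human_years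
instance (human_years : Int) (out : Option (List Int)) : Decidable (Spec_human_years_cat_years_dog_years human_years out) := by unfold Spec_human_years_cat_years_dog_years; infer_instance

-- ===== CLAIM =====
def Claim_equal_human_years_cat_years_dog_years : Prop := ∀ (human_years : Int), Dom_human_years_cat_years_dog_years human_years → Spec_human_years_cat_years_dog_years human_years (human_years_cat_years_dog_years human_years)

-- ===== LEMMAS AND PROOFS =====
theorem human_years_cat_years_dog_years_spec : Claim_equal_human_years_cat_years_dog_years := by
  intro h _
  unfold Spec_human_years_cat_years_dog_years human_years_cat_years_dog_years human_years_cat_years_dog_years_alt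
  by_cases hlt : h < 1
  · simp [hlt]
  · have hge : 1 ≤ h := by omega
    simp only [if_neg hlt, if_pos hge, List.foldl, List.nil_append,
      Option.some.injEq, List.cons.injEq, and_true, true_and]
    by_cases h1 : h = 1
    · subst h1; norm_num
    · by_cases h2 : h = 2
      · subst h2; norm_num
      · have h3 : 3 ≤ h := by omega
        simp only [if_neg h1, if_neg h2]
        have e1 : min 2 (h + 1) = 2 := by omega
        have e2 : min 3 (h + 1) = 3 := by omega
        have e3 : min (h + 1) (h + 1) = h + 1 := by omega
        rw [e1, e2, e3]
        have f1 : max (2 - 1 : Int) 0 = 1 := by omega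
        have f2 : max (3 - 2 : Int) 0 = 1 := by omega
        have f3 : max (h + 1 - 3) 0 = h - 2 := by omega
        rw [f1, f2, f3]
        constructor <;> ring
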